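-- pv_equiv track=rewrite | github.com/zeoxisca/SMS4 | extend/EN.py | NMDealIn
-- ===== SOURCE A (Python) =====
-- def str2uni(in_text, length):  # str转换为unicode
--     out_text = []
--     for i in range(length):
--         out_text.append(ord(in_text[i]))
--     return out_text
--
-- def uni2bit(in_text, length):  # unicode转换为二进制
--     out_text = []
--     for i in range(length * 16):
--         out_text.append((in_text[int(i / 16)] >> (i % 16)) & 1)
--     if len(out_text) % 128 != 0:
--         for j in range(128 - len(out_text) % 128):
--             out_text.append(0)
--     return out_text
--
-- def NMDealIn(in_text):
--     str = str2uni(in_text, len(in_text))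
--     bit = uni2bit(str, len(str))
--     termNum = len(bit) // 128
--     out = []
--     for i in range(termNum):
--         a = bit[i * 128:128 * (i + 1)]
--         out.append(a)
--
--     return out
-- ===== SOURCE B (Python) =====
-- def NMDealIn(in_text):
--     out = []
--     rest = in_text
--     while rest:
--         group, rest = rest[:8], rest[8:]
--         block = []
--         for c in group:
--             o = ord(c)
--             for j in range(16):
--                 block.append((o >> j) & 1)
--         block += [0] * (128 - len(block))
--         out.append(block)
--     return out
-- ===== Notes on version B (the rewrite author's own statement) =====
-- stated objective: alternative
-- what changed: B partitions the input into groups of 8 characters and emits each 128-bit block directly (16 LSB-first bits per char, zero-padded for a short final group), instead of A's three passes that build the full flat bit list and then slice it into 128-bit chunks.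
import Mathlib
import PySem

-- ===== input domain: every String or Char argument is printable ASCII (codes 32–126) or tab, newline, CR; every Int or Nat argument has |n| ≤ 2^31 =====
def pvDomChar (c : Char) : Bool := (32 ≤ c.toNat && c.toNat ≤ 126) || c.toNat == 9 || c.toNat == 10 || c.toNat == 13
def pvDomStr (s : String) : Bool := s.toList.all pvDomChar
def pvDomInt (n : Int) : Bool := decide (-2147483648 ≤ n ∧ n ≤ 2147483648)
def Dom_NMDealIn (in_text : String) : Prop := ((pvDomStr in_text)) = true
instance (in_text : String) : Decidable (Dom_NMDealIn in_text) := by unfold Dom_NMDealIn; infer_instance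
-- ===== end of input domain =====

-- B builds each 128-bit block directly from its group of 8 characters in one pass
-- (different decomposition), instead of flattening all bits and then slicing; same return value.

-- ===== PORT A =====
-- literal port of str2uni; the .getD ' ' default is never used (the index is always in range)
def str2uni (in_text : String) (length : Int) : List Int :=
  (PySem.List.pyRange 0 length).foldl
    (fun out_text i => out_text ++ [(((PySem.Str.pyGet? in_text i).getD ' ').toNat : Int)]) []

-- literal port of uni2bit; the pyGetD default 0 is never used (int(i/16) < length)
def uni2bit (in_text : List Int) (length : Int) : List Int :=
  let out_text :=
    (PySem.List.pyRange 0 (length * 16)).foldl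
      (fun out_text i =>
        out_text ++
          [PySem.Int.band
            (PySem.List.pyGetD in_text (PySem.Int.truncdiv i 16) 0 >>>
              (PySem.Int.mod i 16).toNat) 1]) []
  if PySem.Int.mod (out_text.length : Int) 128 ≠ 0 then
    (PySem.List.pyRange 0 (128 - PySem.Int.mod (out_text.length : Int) 128)).foldl
      (fun out_text _ => out_text ++ [(0 : Int)]) out_text
  else out_text

def NMDealIn (in_text : String) : List (List Int) :=
  let ustr := str2uni in_text (PySem.Str.len in_text)
  let bit := uni2bit ustr (ustr.length : Int)
  let termNum := PySem.Int.floordiv (bit.length : Int) 128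
  (PySem.List.pyRange 0 termNum).foldl
    (fun out i => out ++ [PySem.List.slice bit (some (i * 128)) (some (128 * (i + 1)))]) []

-- ===== PORT B =====
-- one block from one group of (up to 8) characters, bits LSB-first, zero-padded to 128
def blockOf (g : List Char) : List Int :=
  let block :=
    g.foldl
      (fun block c =>
        (List.range 16).foldl
          (fun (block : List Int) (j : Nat) => block ++ [PySem.Int.band ((c.toNat : Int) >>> j) 1]) block) []
  block ++ List.replicate (128 - block.length) 0

-- the 'while rest:' loop: split off a group of up to 8 characters, emit its block, recurse
def altBlocks : List Char → List (List Int)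
  | [] => []
  | c1 :: c2 :: c3 :: c4 :: c5 :: c6 :: c7 :: c8 :: rest =>
      blockOf [c1, c2, c3, c4, c5, c6, c7, c8] :: altBlocks rest
  | cs => [blockOf cs]

def NMDealIn_alt (in_text : String) : List (List Int) := altBlocks in_text.toList

-- ===== PRECONDITION & SPEC =====
def Spec_NMDealIn (in_text : String) (out : List (List Int)) : Prop := out = NMDealIn_alt in_text
instance (in_text : String) (out : List (List Int)) : Decidable (Spec_NMDealIn in_text out) := by unfold Spec_NMDealIn; infer_instance

-- ===== CLAIM (what is proved, stated in full; the proofs are below) =====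
def Claim_equal_NMDealIn : Prop := ∀ (in_text : String), Dom_NMDealIn in_text → Spec_NMDealIn in_text (NMDealIn in_text)

-- ===== LEMMAS AND PROOFS =====

-- 16 bits of one ord value, LSB first
def bitsOf (u : Int) : List Int := (List.range 16).map (fun (j : Nat) => PySem.Int.band (u >>> j) 1)

def bitsC (c : Char) : List Int := bitsOf (c.toNat : Int)

-- padding length A appends to the flat bit list of n characters
def padN (n : Nat) : Nat := (128 - 16 * n % 128) % 128

-- reference chunking into 128-bit blocks
def chunk128 (l : List Int) : List (List Int) :=
  match l with
  | [] => []
  | a :: t => (a :: t).take 128 :: chunk128 ((a :: t).drop 128)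
termination_by l.length
decreasing_by simp

theorem chunk128_cons (l : List Int) (h : l ≠ []) :
    chunk128 l = l.take 128 :: chunk128 (l.drop 128) := by
  cases l with
  | nil => exact absurd rfl h
  | cons a t => rw [chunk128]

theorem str2uni_eq (s : String) :
    str2uni s (PySem.Str.len s) = s.toList.map (fun c => (c.toNat : Int)) := by
  unfold str2uni
  rw [PySem.List.foldl_append_singleton_eq_map]
  have h1 : (fun (i : Int) => (((PySem.Str.pyGet? s i).getD ' ').toNat : Int))
      = fun i => ((PySem.List.pyGetD s.toList i ' ').toNat : Int) := by
    funext i; simp [PySem.List.pyGetD]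
  rw [h1, PySem.Str.len_eq]
  have h2 : ((s.toList.length : Int)) = PySem.List.len s.toList := by
    simp [PySem.List.len]
  rw [h2, List.nil_append]
  have h3 := PySem.List.map_pyGetD_pyRange_zero s.toList ' '
  calc (PySem.List.pyRange 0 (PySem.List.len s.toList)).map
        (fun i => ((PySem.List.pyGetD s.toList i ' ').toNat : Int))
      = ((PySem.List.pyRange 0 (PySem.List.len s.toList)).map
          (fun i => PySem.List.pyGetD s.toList i ' ')).map (fun c => (c.toNat : Int)) := by
        rw [List.map_map]; rfl
    _ = s.toList.map (fun c => (c.toNat : Int)) := by rw [h3]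

theorem length_bitsOf (u : Int) : (bitsOf u).length = 16 := by simp [bitsOf]

theorem length_flat (cs : List Char) : (cs.flatMap bitsC).length = 16 * cs.length := by
  induction cs with
  | nil => simp
  | cons a t ih => simp [List.flatMap_cons, ih, bitsC, length_bitsOf]; omega

-- the main bit loop of uni2bit, reduced to Nat indices, equals the flat bit list
theorem bitloop_eq (us : List Int) :
    (List.range (us.length * 16)).map
      (fun k => PySem.Int.band (us.getD (k / 16) 0 >>> (k % 16)) 1)
    = us.flatMap bitsOf := by
  induction us using List.reverseRecOn with
  | nil => simp
  | append_singleton ys u ih =>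
    have hlen : (ys ++ [u]).length * 16 = ys.length * 16 + 16 := by simp; ring
    rw [hlen, List.range_add, List.map_append]
    have h1 : (List.range (ys.length * 16)).map
        (fun k => PySem.Int.band ((ys ++ [u]).getD (k / 16) 0 >>> (k % 16)) 1)
        = (List.range (ys.length * 16)).map
        (fun k => PySem.Int.band (ys.getD (k / 16) 0 >>> (k % 16)) 1) := by
      apply List.map_congr_left
      intro k hk
      have hk' : k < ys.length * 16 := List.mem_range.mp hk
      have hlt : k / 16 < ys.length := by omega
      rw [List.getD_append _ _ _ _ hlt]
    have h2 : ((List.range 16).map (fun x => ys.length * 16 + x)).map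
        (fun k => PySem.Int.band ((ys ++ [u]).getD (k / 16) 0 >>> (k % 16)) 1)
        = bitsOf u := by
      rw [List.map_map, bitsOf]
      apply List.map_congr_left
      intro j hj
      have hj' : j < 16 := List.mem_range.mp hj
      have hd : (ys.length * 16 + j) / 16 = ys.length := by omega
      have hm : (ys.length * 16 + j) % 16 = j := by omega
      simp only [Function.comp_apply, hd, hm]
      have hu : (ys ++ [u]).getD ys.length 0 = u := by simp [List.getD]
      rw [hu]
    rw [h1, ih, h2, ← List.flatMap_singleton bitsOf u, ← List.flatMap_append]

-- A's uni2bit on the ord list equals flat bits plus zero padding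
theorem uni2bit_eq (cs : List Char) :
    uni2bit (cs.map (fun c => (c.toNat : Int))) ((cs.map (fun c => (c.toNat : Int))).length : Int)
    = cs.flatMap bitsC ++ List.replicate (padN cs.length) 0 := by
  set us := cs.map (fun c => (c.toNat : Int)) with hus
  unfold uni2bit
  have hmain :
      (PySem.List.pyRange 0 ((us.length : Int) * 16)).foldl
        (fun out_text i =>
          out_text ++
            [PySem.Int.band
              (PySem.List.pyGetD us (PySem.Int.truncdiv i 16) 0 >>>
                (PySem.Int.mod i 16).toNat) 1]) []
      = cs.flatMap bitsC := by
    rw [PySem.List.foldl_append_singleton_eq_map, List.nil_append]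
    have hcast : ((us.length : Int) * 16) = ((us.length * 16 : Nat) : Int) := by push_cast; ring
    rw [hcast, PySem.List.pyRange_zero_natCast, List.map_map]
    have hfun : ∀ k : Nat, k ∈ List.range (us.length * 16) →
        ((fun i => PySem.Int.band
            (PySem.List.pyGetD us (PySem.Int.truncdiv i 16) 0 >>>
              (PySem.Int.mod i 16).toNat) 1) ∘ (fun k : Nat => (k : Int))) k
        = PySem.Int.band (us.getD (k / 16) 0 >>> (k % 16)) 1 := by
      intro k _
      simp only [Function.comp_apply]
      have ht : PySem.Int.truncdiv (k : Int) 16 = ((k / 16 : Nat) : Int) := by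
        simp [PySem.Int.truncdiv, Int.tdiv]
      have hm : PySem.Int.mod (k : Int) 16 = ((k % 16 : Nat) : Int) := by
        exact_mod_cast PySem.Int.mod_natCast k 16
      rw [ht, hm, PySem.List.pyGetD_natCast]
      simp only [Int.toNat_natCast, List.getD]
    rw [List.map_congr_left hfun, bitloop_eq us, hus, List.flatMap_map]
    rfl
  rw [hmain]
  have hlenflat : ((cs.flatMap bitsC).length : Int) = ((16 * cs.length : Nat) : Int) := by
    rw [length_flat]
  have hmodv : PySem.Int.mod ((cs.flatMap bitsC).length : Int) 128
      = ((16 * cs.length % 128 : Nat) : Int) := by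
    rw [hlenflat]
    have h128 := PySem.Int.mod_natCast (16 * cs.length) 128
    rw [show ((128:Nat):Int) = (128:Int) by norm_num] at h128
    rw [h128]
  by_cases h0 : (16 * cs.length) % 128 = 0
  · rw [if_neg (by rw [hmodv, h0]; simp)]
    rw [show padN cs.length = 0 from by unfold padN; omega]
    simp
  · rw [if_pos (by rw [hmodv]; exact_mod_cast h0)]
    rw [hmodv, PySem.List.foldl_append_singleton_eq_map]
    have hsub : (128 : Int) - ((16 * cs.length % 128 : Nat) : Int)
        = ((128 - 16 * cs.length % 128 : Nat) : Int) := by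
      have hlt : 16 * cs.length % 128 < 128 := Nat.mod_lt _ (by norm_num)
      push_cast [Nat.cast_sub (le_of_lt hlt)]
      ring
    rw [hsub, PySem.List.pyRange_zero_natCast, List.map_map]
    rw [show padN cs.length = 128 - 16 * cs.length % 128 from by unfold padN; omega]
    congr 1
    rw [show ((fun (_ : Int) => (0:Int)) ∘ (fun (k : Nat) => (k : Int))) = fun _ => (0:Int) from rfl]
    rw [List.map_const', List.length_range]

-- A's slicing loop equals chunk128 on a list whose length is a multiple of 128
theorem chunks_eq (k : Nat) (l : List Int) (h : l.length = 128 * k) :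
    (List.range k).map (fun j => (l.drop (j * 128)).take 128) = chunk128 l := by
  induction k generalizing l with
  | zero =>
    have hl : l = [] := List.eq_nil_of_length_eq_zero (by omega)
    subst hl; rw [chunk128]; rfl
  | succ k ih =>
    have hne : l ≠ [] := by
      intro he; subst he; simp at h
    rw [chunk128_cons l hne, List.range_succ_eq_map, List.map_cons, List.map_map]
    refine congr_arg₂ List.cons (by norm_num) ?_
    rw [← ih (l.drop 128) (by simp [h]; omega)]
    apply List.map_congr_left
    intro j _
    simp only [Function.comp_apply]
    rw [List.drop_drop]
    congr 2
    omega

theorem slice_loop_eq (l : List Int) (k : Nat) (h : l.length = 128 * k) :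
    (PySem.List.pyRange 0 ((k : Nat) : Int)).foldl
      (fun out i => out ++ [PySem.List.slice l (some (i * 128)) (some (128 * (i + 1)))]) []
    = chunk128 l := by
  rw [PySem.List.foldl_append_singleton_eq_map, List.nil_append,
    PySem.List.pyRange_zero_natCast, List.map_map]
  rw [← chunks_eq k l h]
  apply List.map_congr_left
  intro j _
  simp only [Function.comp_apply]
  have h1 : ((j : Int) * 128) = ((j * 128 : Nat) : Int) := by push_cast; ring
  have h2 : (128 * ((j : Int) + 1)) = ((128 * (j + 1) : Nat) : Int) := by push_cast; ring
  rw [h1, h2, PySem.List.slice_natCast]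
  congr 1
  omega

-- B's block from one group is the group's flat bits plus zero padding
theorem blockOf_eq (g : List Char) :
    blockOf g = g.flatMap bitsC ++ List.replicate (128 - 16 * g.length) 0 := by
  unfold blockOf
  simp only [PySem.List.foldl_append_eq_flatMap, List.nil_append]
  have hbits : (fun (x : Char) => List.flatMap
      (fun (j : Nat) => [PySem.Int.band ((x.toNat : Int) >>> j) 1]) (List.range 16)) = bitsC := by
    funext x
    rw [bitsC, bitsOf]
    exact Eq.symm List.map_eq_flatMap
  rw [hbits, length_flat]

theorem short_block (g : List Char) (h1 : 1 ≤ g.length) (h7 : g.length ≤ 7) :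
    [blockOf g] = chunk128 (g.flatMap bitsC ++ List.replicate (padN g.length) 0) := by
  rw [blockOf_eq]
  rw [show padN g.length = 128 - 16 * g.length from by unfold padN; omega]
  have hl : (g.flatMap bitsC ++ List.replicate (128 - 16 * g.length) (0:Int)).length = 128 := by
    rw [List.length_append, length_flat, List.length_replicate]
    omega
  rw [chunk128_cons _ (by
    intro he
    have := congrArg List.length he
    simp [hl] at this)]
  rw [List.take_of_length_le (le_of_eq hl), List.drop_eq_nil_of_le (le_of_eq hl)]
  rw [show chunk128 ([] : List Int) = [] from by rw [chunk128]]

theorem altBlocks_eq (cs : List Char) :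
    altBlocks cs = chunk128 (cs.flatMap bitsC ++ List.replicate (padN cs.length) 0) := by
  induction cs using altBlocks.induct
  all_goals first
  | (rw [show altBlocks ([] : List Char) = [] from by rw [altBlocks]]
     norm_num [padN]
     rw [show chunk128 ([] : List Int) = [] from by rw [chunk128]])
  | (rename_i c1 c2 c3 c4 c5 c6 c7 c8 rest ih
     rw [altBlocks, blockOf_eq, ih]
     rw [show (c1::c2::c3::c4::c5::c6::c7::c8::rest)
          = [c1,c2,c3,c4,c5,c6,c7,c8] ++ rest from rfl, List.flatMap_append]
     have hb1 : (([c1,c2,c3,c4,c5,c6,c7,c8] : List Char).flatMap bitsC).length = 128 := by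
       rw [length_flat]
       rfl
     have hb1ne : ([c1,c2,c3,c4,c5,c6,c7,c8] : List Char).flatMap bitsC ≠ [] := by
       intro he
       rw [he] at hb1
       simp at hb1
     have hpad : padN rest.length
         = padN (([c1,c2,c3,c4,c5,c6,c7,c8] : List Char) ++ rest).length := by
       simp only [padN, List.length_append, List.length_cons, List.length_nil]
       omega
     have houter : (([c1,c2,c3,c4,c5,c6,c7,c8] : List Char).flatMap bitsC ++
         (rest.flatMap bitsC ++ List.replicate (padN rest.length) (0:Int))) ≠ [] := by
       intro he
       exact hb1ne (List.append_eq_nil_iff.mp he).1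
     rw [← hpad, List.append_assoc]
     conv_rhs => rw [chunk128_cons _ houter]
     rw [← hb1, List.take_left, List.drop_left, hb1]
     rw [show (128:Nat) - 16 * ([c1,c2,c3,c4,c5,c6,c7,c8] : List Char).length = 0 from rfl,
       List.replicate_zero, List.append_nil])
  | (rename_i cs' h0 h8
     have h1 : 1 ≤ cs'.length := by
       cases cs' with
       | nil => exact (h0 rfl).elim
       | cons a t => simp
     have h7 : cs'.length ≤ 7 := by
       by_contra hgt
       rw [not_le] at hgt
       obtain ⟨a1, t1, rfl⟩ := List.exists_cons_of_ne_nil (List.ne_nil_of_length_pos (l := cs') (by omega))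
       simp only [List.length_cons] at hgt
       obtain ⟨a2, t2, rfl⟩ := List.exists_cons_of_ne_nil (List.ne_nil_of_length_pos (l := t1) (by omega))
       simp only [List.length_cons] at hgt
       obtain ⟨a3, t3, rfl⟩ := List.exists_cons_of_ne_nil (List.ne_nil_of_length_pos (l := t2) (by omega))
       simp only [List.length_cons] at hgt
       obtain ⟨a4, t4, rfl⟩ := List.exists_cons_of_ne_nil (List.ne_nil_of_length_pos (l := t3) (by omega))
       simp only [List.length_cons] at hgt
       obtain ⟨a5, t5, rfl⟩ := List.exists_cons_of_ne_nil (List.ne_nil_of_length_pos (l := t4) (by omega))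
       simp only [List.length_cons] at hgt
       obtain ⟨a6, t6, rfl⟩ := List.exists_cons_of_ne_nil (List.ne_nil_of_length_pos (l := t5) (by omega))
       simp only [List.length_cons] at hgt
       obtain ⟨a7, t7, rfl⟩ := List.exists_cons_of_ne_nil (List.ne_nil_of_length_pos (l := t6) (by omega))
       simp only [List.length_cons] at hgt
       obtain ⟨a8, t8, rfl⟩ := List.exists_cons_of_ne_nil (List.ne_nil_of_length_pos (l := t7) (by omega))
       exact h8 a1 a2 a3 a4 a5 a6 a7 a8 t8 rfl
     rw [altBlocks]
     · exact short_block _ h1 h7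
     · exact h0
     · exact h8)

-- ===== VERDICT (by name: the statement is the Claim_ definition above) =====
theorem NMDealIn_spec : Claim_equal_NMDealIn := by
  intro s _
  unfold Spec_NMDealIn NMDealIn_alt
  have h1 : NMDealIn s =
      (PySem.List.pyRange 0 (PySem.Int.floordiv
        (((uni2bit (str2uni s (PySem.Str.len s)) ((str2uni s (PySem.Str.len s)).length : Int)).length : Int)) 128)).foldl
        (fun out i => out ++
          [PySem.List.slice (uni2bit (str2uni s (PySem.Str.len s)) ((str2uni s (PySem.Str.len s)).length : Int))
            (some (i * 128)) (some (128 * (i + 1)))]) [] := rfl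
  rw [h1, str2uni_eq, uni2bit_eq]
  set cs := s.toList with hcs
  have hdvd : 128 ∣ 16 * cs.length + padN cs.length := by
    unfold padN; omega
  obtain ⟨k, hk⟩ := hdvd
  have hL : (cs.flatMap bitsC ++ List.replicate (padN cs.length) (0:Int)).length = 128 * k := by
    rw [List.length_append, length_flat, List.length_replicate, hk]
  have hterm : PySem.Int.floordiv
      ((cs.flatMap bitsC ++ List.replicate (padN cs.length) (0:Int)).length : Int) 128
      = ((k : Nat) : Int) := by
    rw [hL, show (128:Int) = ((128:Nat):Int) from by norm_num, PySem.Int.floordiv_natCast]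
    rw [Nat.mul_div_cancel_left k (by norm_num)]
  rw [hterm, slice_loop_eq _ k hL, ← altBlocks_eq]
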